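-- pv_equiv track=rewrite | github.com/MrBrantCode/unitest_baseline | mut_generate/mist_train_cf/cf_28664/solution.py | extract_copyright_info
-- ===== SOURCE A (Python) =====
-- def extract_copyright_info(text: str) -> dict:
--     copyright_info = {}
--     lines = text.split('\n')
--     copyright_info["date"] = lines[0].strip()
--     copyright_holder = lines[1].strip()
--     for line in lines[2:]:
--         if line.lstrip().startswith("Licensed under the"):
--             copyright_info["license"] = line.lstrip("Licensed under the").strip()
--             break
--         else:
--             copyright_holder += " " + line.strip()
--     copyright_info["copyright_holder"] = copyright_holder
--
--     return copyright_info
-- ===== SOURCE B (Python) =====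
-- def extract_copyright_info(text: str) -> dict:
--     # locate-then-join decomposition: locate the license marker line first,
--     # then assemble the holder with a single space-join
--     lines = text.split('\n')
--     info = {"date": lines[0].strip()}
--     rest = lines[2:]
--     idx = next((i for i, l in enumerate(rest)
--                 if l.lstrip().startswith("Licensed under the")), None)
--     if idx is not None:
--         info["license"] = rest[idx].lstrip("Licensed under the").strip()
--     info["copyright_holder"] = " ".join([lines[1].strip()] + [l.strip() for l in rest[:idx]])
--     return info
-- ===== Notes on version B (the rewrite author's own statement) =====
-- stated objective: simpler
-- what changed: A's interleaved accumulate-or-break loop over lines[2:] is replaced by a locate-then-join decomposition: first locate the license marker line, then build copyright_holder with a single space-join over the lines before it.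
import Mathlib
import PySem

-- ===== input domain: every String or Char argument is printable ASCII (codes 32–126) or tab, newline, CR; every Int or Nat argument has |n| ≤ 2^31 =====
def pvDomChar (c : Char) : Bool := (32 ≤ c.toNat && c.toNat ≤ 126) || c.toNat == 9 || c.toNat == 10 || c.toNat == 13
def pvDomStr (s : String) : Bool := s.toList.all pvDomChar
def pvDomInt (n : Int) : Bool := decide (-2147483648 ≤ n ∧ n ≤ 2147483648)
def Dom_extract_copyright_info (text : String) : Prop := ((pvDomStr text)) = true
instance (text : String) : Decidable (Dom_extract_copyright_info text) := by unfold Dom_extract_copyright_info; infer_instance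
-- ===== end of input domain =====

-- B replaces A's interleaved accumulate-or-break loop by a locate-then-join decomposition
-- (find the marker line index first, then one join over the lines before it); objective: simpler.

-- ===== PORT A =====
def pvLicChars : List Char := "Licensed under the".toList

-- Python's s.lstrip(chars): drop leading characters that occur anywhere in `chars` (exact; hand port)
def pvLstripChars (s chars : List Char) : List Char := s.dropWhile (· ∈ chars)

-- A's for-loop over lines[2:], carrying the dict and the accumulating holder string
def pvALoop : List (List Char) → PySem.Dict String String → List Char →
    PySem.Dict String String × List Char
  | [], info, holder => (info, holder)
  | line :: rest, info, holder =>
    if PySem.Chars.startswith (PySem.Chars.lstrip line) pvLicChars then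
      (info.insert "license" (String.ofList (PySem.Chars.strip (pvLstripChars line pvLicChars))), holder)
    else
      pvALoop rest info (holder ++ [' '] ++ PySem.Chars.strip line)

def extract_copyright_info (text : String) : List (String × String) :=
  let lines := (PySem.Chars.split? text.toList ['\n']).getD []
  match lines with
  | l0 :: l1 :: rest =>
    let info := (PySem.Dict.empty : PySem.Dict String String).insert "date"
      (String.ofList (PySem.Chars.strip l0))
    let r := pvALoop rest info (PySem.Chars.strip l1)
    (r.1.insert "copyright_holder" (String.ofList r.2)).items
  | _ => []   -- Python raises IndexError at lines[1] here; excluded by Pre_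

-- ===== PORT B =====
def extract_copyright_info_alt (text : String) : List (String × String) :=
  let lines := (PySem.Chars.split? text.toList ['\n']).getD []
  match lines with
  | [] => []        -- Python raises IndexError at lines[1]; excluded by Pre_
  | l0 :: body =>
  match body with
  | [] => []        -- Python raises IndexError at lines[1]; excluded by Pre_
  | l1 :: rest =>
    let idx? := rest.findIdx?
      (fun l => PySem.Chars.startswith (PySem.Chars.lstrip l) pvLicChars)
    let holder := String.ofList (PySem.Chars.join [' ']
      (PySem.Chars.strip l1 ::
        (match idx? with | none => rest | some i => rest.take i).map PySem.Chars.strip))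
    match idx? with
    | none =>
      [("date", String.ofList (PySem.Chars.strip l0)), ("copyright_holder", holder)]
    | some i =>
      [("date", String.ofList (PySem.Chars.strip l0)),
       ("license", String.ofList (PySem.Chars.strip (pvLstripChars (rest.getD i []) pvLicChars))),
       ("copyright_holder", holder)]

-- ===== PRECONDITION & SPEC =====
-- Pre_ excludes texts without a newline: there Python A raises IndexError at lines[1].
def Pre_extract_copyright_info (text : String) : Prop := '\n' ∈ text.toList
instance (text : String) : Decidable (Pre_extract_copyright_info text) := by
  unfold Pre_extract_copyright_info; infer_instance

def pvWitness_extract_copyright_info : String :=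
  "2024-01-01\nAcme Corp\nLicensed under the MIT License"

def Spec_extract_copyright_info (text : String) (out : List (String × String)) : Prop :=
  out = extract_copyright_info_alt text
instance (text : String) (out : List (String × String)) :
    Decidable (Spec_extract_copyright_info text out) := by
  unfold Spec_extract_copyright_info; infer_instance

-- ===== CLAIM (what is proved, stated in full; the proofs are below) =====
def Claim_equal_extract_copyright_info : Prop :=
  ∀ (text : String), Dom_extract_copyright_info text → Pre_extract_copyright_info text →
    Spec_extract_copyright_info text (extract_copyright_info text)

-- ===== LEMMAS AND PROOFS =====

theorem pvGoLen (sep : List Char) :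
    ∀ (fuel : Nat) (l cur : List Char) (acc : List (List Char)),
      acc.length + 1 ≤ (PySem.Chars.splitOn.go sep fuel l cur acc).length := by
  intro fuel
  induction fuel with
  | zero => intro l cur acc; simp [PySem.Chars.splitOn.go]
  | succ n ih =>
    intro l cur acc
    cases l with
    | nil => simp [PySem.Chars.splitOn.go]
    | cons c rest =>
      simp only [PySem.Chars.splitOn.go]
      split
      · have := ih (List.drop sep.length (c :: rest)) [] (cur.reverse :: acc)
        have hlen : (cur.reverse :: acc).length = acc.length + 1 := by simp
        rw [hlen] at this
        omega
      · exact ih rest (c :: cur) acc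

theorem pvGoMemLen (c : Char) :
    ∀ (fuel : Nat) (l cur : List Char) (acc : List (List Char)),
      c ∈ l → l.length ≤ fuel →
      acc.length + 2 ≤ (PySem.Chars.splitOn.go [c] fuel l cur acc).length := by
  intro fuel
  induction fuel with
  | zero => intro l cur acc hm hl; cases l <;> simp_all
  | succ n ih =>
    intro l cur acc hm hl
    cases l with
    | nil => simp at hm
    | cons c' rest =>
      simp only [PySem.Chars.splitOn.go]
      split
      · rename_i hp
        have := pvGoLen [c] n (List.drop ([c] : List Char).length (c' :: rest)) []
          (cur.reverse :: acc)
        have hlen : (cur.reverse :: acc).length = acc.length + 1 := by simp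
        rw [hlen] at this
        omega
      · rename_i hp
        have hcc : c' ≠ c := by
          intro h; subst h; simp [List.isPrefixOf] at hp
        have hmem : c ∈ rest := by
          rcases List.mem_cons.mp hm with h | h
          · exact absurd h.symm hcc
          · exact h
        exact ih rest (c' :: cur) acc hmem (by simp at hl; omega)

theorem pvLinesShape (cs : List Char) (h : '\n' ∈ cs) :
    ∃ l0 l1 rest, (PySem.Chars.split? cs ['\n']).getD [] = l0 :: l1 :: rest := by
  have h2 : 2 ≤ ((PySem.Chars.split? cs ['\n']).getD []).length := by
    simp only [PySem.Chars.split?, PySem.Chars.splitOn]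
    have := pvGoMemLen '\n' (cs.length + 1) cs [] [] h (by omega)
    simpa using this
  match hq : (PySem.Chars.split? cs ['\n']).getD [] with
  | [] => rw [hq] at h2; simp at h2
  | [x] => rw [hq] at h2; simp at h2
  | l0 :: l1 :: rest => exact ⟨l0, l1, rest, rfl⟩

theorem pvItems2 (a c : String) :
    ((((PySem.Dict.empty : PySem.Dict String String).insert "date" a).insert
        "copyright_holder" c)).items = [("date", a), ("copyright_holder", c)] := by
  simp [PySem.Dict.insert, PySem.Dict.empty, PySem.Dict.contains]

theorem pvItems3 (a b c : String) :
    (((((PySem.Dict.empty : PySem.Dict String String).insert "date" a).insert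
        "license" b).insert "copyright_holder" c)).items =
      [("date", a), ("license", b), ("copyright_holder", c)] := by
  simp [PySem.Dict.insert, PySem.Dict.empty, PySem.Dict.contains]

theorem pvJoinGlue (sep a b : List Char) (m : List (List Char)) :
    PySem.Chars.join sep ((a ++ sep ++ b) :: m) = a ++ sep ++ PySem.Chars.join sep (b :: m) := by
  cases m with
  | nil => simp [PySem.Chars.join_singleton]
  | cons y m' =>
    rw [PySem.Chars.join_cons_cons, PySem.Chars.join_cons_cons]
    simp [List.append_assoc]

def pvLicPred (l : List Char) : Bool :=
  PySem.Chars.startswith (PySem.Chars.lstrip l) pvLicChars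

theorem pvLoopNone (rest : List (List Char)) (d : PySem.Dict String String) (h : List Char)
    (hn : rest.findIdx? pvLicPred = none) :
    pvALoop rest d h = (d, PySem.Chars.join [' '] (h :: rest.map PySem.Chars.strip)) := by
  induction rest generalizing h with
  | nil => simp [pvALoop, PySem.Chars.join_singleton]
  | cons l rs ih =>
    have hall := List.findIdx?_eq_none_iff.mp hn
    have hl : pvLicPred l = false := hall l (List.mem_cons_self ..)
    have hrs : rs.findIdx? pvLicPred = none :=
      List.findIdx?_eq_none_iff.mpr fun x hx => hall x (List.mem_cons_of_mem _ hx)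
    simp only [pvALoop, pvLicPred] at hl ⊢
    rw [hl]
    simp only [Bool.false_eq_true, if_false]
    rw [ih _ hrs]
    have := pvJoinGlue [' '] h (PySem.Chars.strip l) (rs.map PySem.Chars.strip)
    simp only [List.map_cons]
    rw [this, PySem.Chars.join_cons_cons]

theorem pvLoopSome (rest : List (List Char)) (d : PySem.Dict String String) (h : List Char)
    (i : Nat) (hi : rest.findIdx? pvLicPred = some i) :
    pvALoop rest d h =
      (d.insert "license"
        (String.ofList (PySem.Chars.strip (pvLstripChars (rest.getD i []) pvLicChars))),
       PySem.Chars.join [' '] (h :: (rest.take i).map PySem.Chars.strip)) := by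
  induction rest generalizing h i with
  | nil => simp at hi
  | cons l rs ih =>
    rw [List.findIdx?_cons] at hi
    by_cases hl : pvLicPred l = true
    · rw [if_pos hl] at hi
      cases hi
      simp only [pvALoop, pvLicPred] at hl ⊢
      rw [hl]
      simp [PySem.Chars.join_singleton]
    · rw [if_neg hl] at hi
      rcases Option.map_eq_some_iff.mp hi with ⟨j, hj, hij⟩
      subst hij
      simp only [pvALoop, pvLicPred] at hl ⊢
      rw [if_neg hl]
      rw [ih _ j hj]
      simp only [List.getD_cons_succ, List.take_succ_cons, List.map_cons]
      rw [pvJoinGlue [' '] h (PySem.Chars.strip l) ((rs.take j).map PySem.Chars.strip),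
        PySem.Chars.join_cons_cons]

-- ===== VERDICT (by name: the statement is the Claim_ definition above) =====
theorem extract_copyright_info_spec : Claim_equal_extract_copyright_info := by
  intro text _ hpre
  unfold Spec_extract_copyright_info
  obtain ⟨l0, l1, rest, hls⟩ := pvLinesShape text.toList hpre
  unfold extract_copyright_info extract_copyright_info_alt
  rw [hls]
  dsimp only
  cases hf : rest.findIdx? pvLicPred with
  | none =>
    rw [show (rest.findIdx? fun l =>
        PySem.Chars.startswith (PySem.Chars.lstrip l) pvLicChars) = none from hf]
    rw [pvLoopNone rest _ _ hf]
    rw [pvItems2]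
  | some i =>
    rw [show (rest.findIdx? fun l =>
        PySem.Chars.startswith (PySem.Chars.lstrip l) pvLicChars) = some i from hf]
    rw [pvLoopSome rest _ _ i hf]
    rw [pvItems3]
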